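-- pv_equiv track=rewrite | github.com/edu-pi/Backend-Code-Analysis-Server | app/analysis/generator/parser/tuple_parser.py | __convert_expressions_to_tuple
-- ===== SOURCE A (Python) =====
-- def __convert_expressions_to_tuple(expressions):
--     max_length = max(len(sublist) for sublist in expressions)
--
--     tuple_value = []
--     for i in range(max_length):
--         current_tuple = tuple(
--             sublist[i] if isinstance(sublist, list) and i < len(sublist) else sublist[-1]
--             for sublist in expressions
--         )
--         tuple_value.append(current_tuple)
--
--     return tuple_value
-- ===== SOURCE B (Python) =====
-- def __convert_expressions_to_tuple(expressions):
--     max_length = max(len(sublist) for sublist in expressions)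
--     padded = [
--         sublist + [sublist[-1]] * (max_length - len(sublist)) if len(sublist) < max_length else sublist
--         for sublist in expressions
--     ]
--     return list(zip(*padded))
-- ===== Notes on version B (the rewrite author's own statement) =====
-- stated objective: simpler
-- what changed: Instead of an outer loop over column indices with a per-element bounds-test inside, B first pads every sublist to max_length with its last element (one pass per row) and then transposes the equal-length matrix with zip(*padded), swapping the roles of the two loops.
import Mathlib
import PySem

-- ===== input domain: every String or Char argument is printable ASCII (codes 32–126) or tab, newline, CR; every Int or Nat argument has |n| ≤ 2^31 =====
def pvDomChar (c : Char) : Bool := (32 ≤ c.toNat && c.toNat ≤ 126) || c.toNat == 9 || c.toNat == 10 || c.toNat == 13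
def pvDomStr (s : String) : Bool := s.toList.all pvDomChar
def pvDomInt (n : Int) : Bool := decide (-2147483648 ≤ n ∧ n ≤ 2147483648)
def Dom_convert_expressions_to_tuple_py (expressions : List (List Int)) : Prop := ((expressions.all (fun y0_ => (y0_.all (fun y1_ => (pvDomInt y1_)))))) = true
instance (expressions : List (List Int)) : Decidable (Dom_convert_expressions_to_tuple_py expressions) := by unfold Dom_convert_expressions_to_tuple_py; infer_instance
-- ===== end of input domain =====

-- B pads every sublist to max length with its last element and then transposes (zip(*padded)),
-- instead of A's column-index loop with a per-element bounds test; objective: simpler.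


-- ===== PORT A =====
-- literal port: max() over the lengths (none = ValueError on empty input, excluded by Pre_),
-- then for each i in range(max_length) the row of sublist[i] / sublist[-1]; pyGet? none
-- (IndexError, excluded by Pre_) is defaulted to 0.
def convert_expressions_to_tuple_py (expressions : List (List Int)) : List (List Int) :=
  match PySem.List.max? (expressions.map (fun s => (s.length : Int))) (fun x => x) with
  | none => []
  | some max_length =>
    (PySem.List.pyRange 0 max_length 1).foldl (fun tuple_value i =>
      tuple_value ++ [expressions.map (fun sublist =>
        if i < (sublist.length : Int) then (PySem.List.pyGet? sublist i).getD 0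
        else (PySem.List.pyGet? sublist (-1)).getD 0)]) []

-- ===== PORT B =====
-- zip(*rows): repeatedly take the heads until some row is exhausted (Python zip truncation)
def zipStar (rows : List (List Int)) : List (List Int) :=
  if h : rows.isEmpty || rows.any (·.isEmpty) then []
  else (rows.map (fun r => r.headD 0)) :: zipStar (rows.map (fun r => r.tail))
termination_by (rows.headD []).length
decreasing_by
  cases rows with
  | nil => simp at h
  | cons r rs =>
    simp only [List.isEmpty_cons, List.any_cons, Bool.or_eq_true, List.isEmpty_iff, not_or] at h
    cases r with
    | nil => exact absurd rfl h.2.1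
    | cons x xs => simp

def convert_expressions_to_tuple_py_alt (expressions : List (List Int)) : List (List Int) :=
  match PySem.List.max? (expressions.map (fun s => (s.length : Int))) (fun x => x) with
  | none => []
  | some max_length =>
    let padded := expressions.map (fun sublist =>
      if (sublist.length : Int) < max_length then
        sublist ++ List.replicate (max_length - (sublist.length : Int)).toNat
          ((PySem.List.pyGet? sublist (-1)).getD 0)
      else sublist)
    zipStar padded

-- ===== PRECONDITION & SPEC =====
-- Pre_ excludes exactly the inputs where the Python A raises: ValueError on the empty list,
-- IndexError (sublist[-1]) when some sublist is empty while another is not.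
def Pre_convert_expressions_to_tuple_py (expressions : List (List Int)) : Prop :=
  expressions ≠ [] ∧ ((∀ s ∈ expressions, s ≠ []) ∨ (∀ s ∈ expressions, s = []))
instance (expressions : List (List Int)) : Decidable (Pre_convert_expressions_to_tuple_py expressions) := by unfold Pre_convert_expressions_to_tuple_py; infer_instance
def pvWitness_convert_expressions_to_tuple_py : List (List Int) := [[1, 2], [3]]
def Spec_convert_expressions_to_tuple_py (expressions : List (List Int)) (out : List (List Int)) : Prop := out = convert_expressions_to_tuple_py_alt expressions
instance (expressions : List (List Int)) (out : List (List Int)) : Decidable (Spec_convert_expressions_to_tuple_py expressions out) := by unfold Spec_convert_expressions_to_tuple_py; infer_instance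

-- ===== CLAIM (what is proved, stated in full; the proofs are below) =====
def Claim_equal_convert_expressions_to_tuple_py : Prop := ∀ (expressions : List (List Int)), Dom_convert_expressions_to_tuple_py expressions → Pre_convert_expressions_to_tuple_py expressions → Spec_convert_expressions_to_tuple_py expressions (convert_expressions_to_tuple_py expressions)

-- ===== LEMMAS AND PROOFS =====

theorem foldl_append_singleton {α β : Type} (f : α → β) :
    ∀ (l : List α) (acc : List β), l.foldl (fun acc i => acc ++ [f i]) acc = acc ++ l.map f := by
  intro l
  induction l with
  | nil => simp
  | cons x xs ih => intro acc; simp [List.foldl_cons, ih]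

-- zipStar on a nonempty family of rows, all of length n, is the list of the n columns
theorem zipStar_eq_columns :
    ∀ (n : Nat) (rows : List (List Int)), rows ≠ [] → (∀ r ∈ rows, r.length = n) →
      zipStar rows = (List.range n).map (fun k => rows.map (fun r => r.getD k 0)) := by
  intro n
  induction n with
  | zero =>
    intro rows hne hlen
    rw [zipStar]
    cases rows with
    | nil => exact absurd rfl hne
    | cons r rs =>
      have : r = [] := List.eq_nil_of_length_eq_zero (hlen r (by simp))
      simp [this]
  | succ n ih =>
    intro rows hne hlen
    rw [zipStar]
    have hnoE : ¬ (rows.isEmpty || rows.any (·.isEmpty)) = true := by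
      simp only [Bool.or_eq_true, List.any_eq_true, List.isEmpty_iff, not_or]
      constructor
      · exact hne
      · rintro ⟨r, hr, hrE⟩
        have := hlen r hr
        simp [hrE] at this
    rw [dif_neg hnoE]
    rw [ih (rows.map (fun r => r.tail))
        (by cases rows with | nil => exact absurd rfl hne | cons r rs => simp)
        (by intro t ht
            obtain ⟨r, hr, rfl⟩ := List.mem_map.mp ht
            have := hlen r hr
            simp [List.length_tail, this])]
    rw [List.range_succ_eq_map]
    simp only [List.map_cons, List.map_map]
    congr 1
    · apply List.map_congr_left
      intro r hr
      have h1 : r.length = n + 1 := hlen r hr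
      cases r with
      | nil => simp at h1
      | cons x xs => simp
    · apply List.map_congr_left
      intro k hk
      simp only [Function.comp]
      apply List.map_congr_left
      intro r hr
      have h1 : r.length = n + 1 := hlen r hr
      cases r with
      | nil => simp at h1
      | cons x xs => simp

-- the padded row, indexed inside [0, M), reproduces A's conditional entry
theorem padded_getD (s : List Int) (M : Nat) (hle : s.length ≤ M) (k : Nat) (hk : k < M)
    (c : Int) :
    (s ++ List.replicate (M - s.length) c).getD k 0 =
      if (k : Int) < (s.length : Int) then (PySem.List.pyGet? s (k : Int)).getD 0 else c := by
  by_cases h : k < s.length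
  · rw [if_pos (by exact_mod_cast h)]
    rw [PySem.List.pyGet?_natCast]
    rw [List.getD_eq_getElem?_getD, List.getElem?_append_left h]
  · rw [if_neg (by exact_mod_cast h)]
    replace h : s.length <= k := by omega
    rw [List.getD_eq_getElem?_getD, List.getElem?_append_right h]
    have : k - s.length < M - s.length := by omega
    simp [this]

theorem padded_length (s : List Int) (m : Int) (hle : (s.length : Int) ≤ m) (c : Int) :
    (s ++ List.replicate (m - (s.length : Int)).toNat c).length = m.toNat := by
  simp only [List.length_append, List.length_replicate]
  omega

-- ===== VERDICT (by name: the statement is the Claim_ definition above) =====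
theorem convert_expressions_to_tuple_py_spec : Claim_equal_convert_expressions_to_tuple_py := by
  intro expressions _hdom hpre
  obtain ⟨hne, _hshape⟩ := hpre
  unfold Spec_convert_expressions_to_tuple_py
  unfold convert_expressions_to_tuple_py convert_expressions_to_tuple_py_alt
  obtain ⟨m, hmax⟩ : ∃ m, PySem.List.max? (expressions.map (fun s => (s.length : Int))) (fun x => x) = some m := by
    cases hn : PySem.List.max? (expressions.map (fun s => (s.length : Int))) (fun x => x) with
    | none =>
      rw [PySem.List.max?_eq_none_iff] at hn
      simp at hn
      exact absurd hn hne
    | some m => exact ⟨m, rfl⟩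
  simp only [hmax]
  have hmem : m ∈ expressions.map (fun s => (s.length : Int)) := PySem.List.max?_mem hmax
  have hm0 : 0 ≤ m := by
    obtain ⟨s, _, rfl⟩ := List.mem_map.mp hmem
    exact Int.natCast_nonneg _
  have hbound : ∀ s ∈ expressions, (s.length : Int) ≤ m := by
    intro s hs
    exact PySem.List.max?_isMax hmax _ (List.mem_map_of_mem hs)
  -- rewrite A's range/foldl as a map over List.range m.toNat
  rw [PySem.List.pyRange_one, foldl_append_singleton]
  simp only [List.nil_append, Int.sub_zero, List.map_map]
  -- rewrite B's zipStar as the columns of the padded matrix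
  have hpadlen : ∀ t ∈ expressions.map (fun sublist =>
      if (sublist.length : Int) < m then
        sublist ++ List.replicate (m - (sublist.length : Int)).toNat
          ((PySem.List.pyGet? sublist (-1)).getD 0)
      else sublist), t.length = m.toNat := by
    intro t ht
    obtain ⟨s, hs, rfl⟩ := List.mem_map.mp ht
    by_cases h : (s.length : Int) < m
    · rw [if_pos h]
      exact padded_length s m (le_of_lt h) _
    · rw [if_neg h]
      have := hbound s hs
      omega
  rw [zipStar_eq_columns m.toNat _ (by simpa using hne) hpadlen]
  apply List.map_congr_left
  intro k hk
  rw [List.mem_range] at hk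
  simp only [Function.comp, List.map_map]
  apply List.map_congr_left
  intro s hs
  have hle : s.length ≤ m.toNat := by have := hbound s hs; omega
  simp only [Function.comp_apply, zero_add]
  by_cases h : (s.length : Int) < m
  · rw [if_pos h]
    have hrep : (m - (s.length : Int)).toNat = m.toNat - s.length := by omega
    rw [hrep, padded_getD s m.toNat hle k hk]
  · rw [if_neg h]
    have heq : s.length = m.toNat := by have := hbound s hs; omega
    have hks : k < s.length := heq ▸ hk
    rw [if_pos (by omega)]
    rw [PySem.List.pyGet?_natCast]
    simp [List.getD_eq_getElem?_getD, List.getElem?_eq_getElem hks]
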